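-- pv_equiv track=rewrite | github.com/bunkerity/bunkerweb | src/api/app/auth/biscuit.py | _resolve_services
-- ===== SOURCE A (Python) =====
-- from typing import Optional
--
-- PERM_VERB_BY_METHOD = {
--     "GET": "read",
--     "OPTIONS": "read",
--     "POST": "create",
--     "PUT": "update",
--     "PATCH": "update",
--     "DELETE": "delete",
-- }
--
-- def _resolve_services(path_normalized: str, method_u: str) -> tuple[Optional[str], Optional[str]]:
--     """Resolve services endpoints to fine-grained permissions.
--
--     Permissions are named with singular prefix (service_*), resource_type is plural "services".
--     Special endpoints:
--     - POST   /services/convert -> service_convert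
--     - GET    /services/export  -> service_export
--     CRUD:
--     - GET    /services or /services/{id} -> service_read
--     - POST   /services                   -> service_create
--     - PUT|PATCH /services/{id}           -> service_update
--     - DELETE /services/{id}              -> service_delete
--     """
--     rtype = "services"
--     p = path_normalized
--     parts = [seg for seg in p.split("/") if seg]
--
--     # Special actions
--     if p == "/services/convert" and method_u == "POST":
--         return rtype, "service_convert"
--     if p == "/services/export" and method_u in {"GET", "OPTIONS"}:
--         return rtype, "service_export"
--
--     # Read
--     if method_u in {"GET", "OPTIONS"}:
--         if p == "/services" or (len(parts) == 2 and parts[0] == "services"):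
--             return rtype, "service_read"
--     # Create
--     if method_u == "POST" and p == "/services":
--         return rtype, "service_create"
--     # Update
--     if method_u in {"PUT", "PATCH"} and len(parts) == 2 and parts[0] == "services":
--         return rtype, "service_update"
--     # Delete
--     if method_u == "DELETE" and len(parts) == 2 and parts[0] == "services":
--         return rtype, "service_delete"
--
--     # Fallback by verb if under services
--     verb = PERM_VERB_BY_METHOD.get(method_u)
--     if verb == "read":
--         return rtype, "service_read"
--     if verb == "create":
--         return rtype, "service_create"
--     if verb == "update":
--         return rtype, "service_update"
--     if verb == "delete":
--         return rtype, "service_delete"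
--     return rtype, None
-- ===== SOURCE B (Python) =====
-- from typing import Optional
--
-- PERM_VERB_BY_METHOD = {
--     "GET": "read",
--     "OPTIONS": "read",
--     "POST": "create",
--     "PUT": "update",
--     "PATCH": "update",
--     "DELETE": "delete",
-- }
--
-- def _resolve_services(path_normalized: str, method_u: str) -> tuple[Optional[str], Optional[str]]:
--     rtype = "services"
--     if path_normalized == "/services/convert" and method_u == "POST":
--         return rtype, "service_convert"
--     if path_normalized == "/services/export" and method_u in {"GET", "OPTIONS"}:
--         return rtype, "service_export"
--     verb = PERM_VERB_BY_METHOD.get(method_u)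
--     return rtype, (None if verb is None else f"service_{verb}")
-- ===== Notes on version B (the rewrite author's own statement) =====
-- stated objective: simpler
-- what changed: All CRUD path-structure branches of A are subsumed by the verb fallback, so B drops path tokenization entirely: two special-case checks, then a single dict lookup producing f'service_{verb}'.
import Mathlib
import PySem

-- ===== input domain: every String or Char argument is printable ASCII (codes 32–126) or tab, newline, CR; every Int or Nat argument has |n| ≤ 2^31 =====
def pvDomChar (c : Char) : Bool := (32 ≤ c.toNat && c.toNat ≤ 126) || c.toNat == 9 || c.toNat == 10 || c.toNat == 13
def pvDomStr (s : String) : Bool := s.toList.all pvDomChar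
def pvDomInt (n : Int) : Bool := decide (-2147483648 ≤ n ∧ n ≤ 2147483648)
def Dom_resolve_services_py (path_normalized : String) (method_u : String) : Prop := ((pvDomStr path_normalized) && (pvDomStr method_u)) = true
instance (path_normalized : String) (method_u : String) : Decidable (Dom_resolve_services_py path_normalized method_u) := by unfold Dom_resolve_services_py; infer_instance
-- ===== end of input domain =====

-- B drops A's path tokenization: the CRUD branches are subsumed by the verb fallback,
-- leaving two special-case checks plus one dict lookup (objective: simpler).
-- ===== PORT A =====
def PERM_VERB_BY_METHOD : PySem.Dict String String :=
  PySem.Dict.ofList [("GET", "read"), ("OPTIONS", "read"), ("POST", "create"),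
    ("PUT", "update"), ("PATCH", "update"), ("DELETE", "delete")]

def resolve_services_py (path_normalized : String) (method_u : String) : Option String × Option String :=
  let rtype : Option String := some "services"
  let p := path_normalized
  let parts := ((PySem.Str.split? p "/").getD []).filter (fun seg => seg ≠ "")
  if p == "/services/convert" && method_u == "POST" then (rtype, some "service_convert")
  else if p == "/services/export" && (method_u == "GET" || method_u == "OPTIONS") then (rtype, some "service_export")
  else if (method_u == "GET" || method_u == "OPTIONS") &&
      (p == "/services" || (parts.length == 2 && PySem.List.pyGet? parts 0 == some "services")) then
    (rtype, some "service_read")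
  else if method_u == "POST" && p == "/services" then (rtype, some "service_create")
  else if (method_u == "PUT" || method_u == "PATCH") && parts.length == 2 &&
      PySem.List.pyGet? parts 0 == some "services" then (rtype, some "service_update")
  else if method_u == "DELETE" && parts.length == 2 &&
      PySem.List.pyGet? parts 0 == some "services" then (rtype, some "service_delete")
  else
    let verb := PERM_VERB_BY_METHOD.get? method_u
    if verb == some "read" then (rtype, some "service_read")
    else if verb == some "create" then (rtype, some "service_create")
    else if verb == some "update" then (rtype, some "service_update")
    else if verb == some "delete" then (rtype, some "service_delete")
    else (rtype, none)

-- ===== PORT B =====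
def resolve_services_py_alt (path_normalized : String) (method_u : String) : Option String × Option String :=
  let rtype : Option String := some "services"
  if path_normalized == "/services/convert" && method_u == "POST" then (rtype, some "service_convert")
  else if path_normalized == "/services/export" && (method_u == "GET" || method_u == "OPTIONS") then (rtype, some "service_export")
  else
    match PERM_VERB_BY_METHOD.get? method_u with
    | none => (rtype, none)
    | some verb => (rtype, some ("service_" ++ verb))

-- ===== PRECONDITION & SPEC =====
def Spec_resolve_services_py (path_normalized : String) (method_u : String) (out : Option String × Option String) : Prop := out = resolve_services_py_alt path_normalized method_u
instance (path_normalized : String) (method_u : String) (out : Option String × Option String) : Decidable (Spec_resolve_services_py path_normalized method_u out) := by unfold Spec_resolve_services_py; infer_instance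

-- ===== CLAIM (what is proved, stated in full; the proofs are below) =====
def Claim_equal_resolve_services_py : Prop := ∀ (path_normalized : String) (method_u : String), Dom_resolve_services_py path_normalized method_u → Spec_resolve_services_py path_normalized method_u (resolve_services_py path_normalized method_u)

-- ===== LEMMAS AND PROOFS =====

-- ===== VERDICT (by name: the statement is the Claim_ definition above) =====
theorem perm_get?_none (m : String) (hG : m ≠ "GET") (hO : m ≠ "OPTIONS") (hP : m ≠ "POST")
    (hU : m ≠ "PUT") (hA : m ≠ "PATCH") (hD : m ≠ "DELETE") :
    PERM_VERB_BY_METHOD.get? m = none := by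
  simp [PERM_VERB_BY_METHOD, PySem.Dict.ofList, PySem.Dict.get?, PySem.Dict.empty,
    PySem.Dict.update, PySem.Dict.insert, Ne.symm hG, Ne.symm hO, Ne.symm hP,
    Ne.symm hU, Ne.symm hA, Ne.symm hD]

theorem case_get (p : String) :
    resolve_services_py p "GET" = resolve_services_py_alt p "GET" := by
  have h : PERM_VERB_BY_METHOD.get? "GET" = some "read" := by decide
  simp only [resolve_services_py, resolve_services_py_alt, h, String.reduceBEq,
    Bool.and_false, Bool.false_and, Bool.and_true, Bool.true_and, Bool.or_false,
    beq_self_eq_true, reduceIte]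
  split_ifs <;> first | rfl | simp_all

theorem case_options (p : String) :
    resolve_services_py p "OPTIONS" = resolve_services_py_alt p "OPTIONS" := by
  have h : PERM_VERB_BY_METHOD.get? "OPTIONS" = some "read" := by decide
  simp only [resolve_services_py, resolve_services_py_alt, h, String.reduceBEq,
    Bool.and_false, Bool.false_and, Bool.and_true, Bool.true_and, Bool.or_false,
    Bool.false_or, beq_self_eq_true, reduceIte]
  split_ifs <;> first | rfl | simp_all

theorem case_post (p : String) :
    resolve_services_py p "POST" = resolve_services_py_alt p "POST" := by
  have h : PERM_VERB_BY_METHOD.get? "POST" = some "create" := by decide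
  simp only [resolve_services_py, resolve_services_py_alt, h, String.reduceBEq,
    Bool.and_false, Bool.false_and, Bool.and_true, Bool.true_and, Bool.or_false,
    Bool.false_or, beq_self_eq_true, reduceIte]
  split_ifs <;> first | rfl | simp_all

theorem case_put (p : String) :
    resolve_services_py p "PUT" = resolve_services_py_alt p "PUT" := by
  have h : PERM_VERB_BY_METHOD.get? "PUT" = some "update" := by decide
  simp only [resolve_services_py, resolve_services_py_alt, h, String.reduceBEq,
    Bool.and_false, Bool.false_and, Bool.and_true, Bool.true_and, Bool.or_false,
    Bool.false_or, beq_self_eq_true, reduceIte]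
  split_ifs <;> first | rfl | simp_all

theorem case_patch (p : String) :
    resolve_services_py p "PATCH" = resolve_services_py_alt p "PATCH" := by
  have h : PERM_VERB_BY_METHOD.get? "PATCH" = some "update" := by decide
  simp only [resolve_services_py, resolve_services_py_alt, h, String.reduceBEq,
    Bool.and_false, Bool.false_and, Bool.and_true, Bool.true_and, Bool.or_false,
    Bool.false_or, beq_self_eq_true, reduceIte]
  split_ifs <;> first | rfl | simp_all

theorem case_delete (p : String) :
    resolve_services_py p "DELETE" = resolve_services_py_alt p "DELETE" := by
  have h : PERM_VERB_BY_METHOD.get? "DELETE" = some "delete" := by decide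
  simp only [resolve_services_py, resolve_services_py_alt, h, String.reduceBEq,
    Bool.and_false, Bool.false_and, Bool.and_true, Bool.true_and, Bool.or_false,
    Bool.false_or, beq_self_eq_true, reduceIte]
  split_ifs <;> first | rfl | simp_all

theorem case_other (m : String) (hG : m ≠ "GET") (hO : m ≠ "OPTIONS") (hP : m ≠ "POST")
    (hU : m ≠ "PUT") (hA : m ≠ "PATCH") (hD : m ≠ "DELETE") (p : String) :
    resolve_services_py p m = resolve_services_py_alt p m := by
  have h := perm_get?_none m hG hO hP hU hA hD
  have bG : (m == "GET") = false := by simp [hG]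
  have bO : (m == "OPTIONS") = false := by simp [hO]
  have bP : (m == "POST") = false := by simp [hP]
  have bU : (m == "PUT") = false := by simp [hU]
  have bA : (m == "PATCH") = false := by simp [hA]
  have bD : (m == "DELETE") = false := by simp [hD]
  simp only [resolve_services_py, resolve_services_py_alt, h, bG, bO, bP, bU, bA, bD,
    Bool.and_false, Bool.false_and, Bool.or_false]
  simp

-- ===== VERDICT (by name: the statement is the Claim_ definition above) =====
theorem resolve_services_py_spec : Claim_equal_resolve_services_py := by
  intro p m _
  unfold Spec_resolve_services_py
  by_cases hG : m = "GET"
  · exact hG ▸ case_get p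
  by_cases hO : m = "OPTIONS"
  · exact hO ▸ case_options p
  by_cases hP : m = "POST"
  · exact hP ▸ case_post p
  by_cases hU : m = "PUT"
  · exact hU ▸ case_put p
  by_cases hA : m = "PATCH"
  · exact hA ▸ case_patch p
  by_cases hD : m = "DELETE"
  · exact hD ▸ case_delete p
  exact case_other m hG hO hP hU hA hD p
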